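-- pv_equiv track=rewrite | github.com/lucasiki/accounts | accounts/validations.py | emailCharacters
-- ===== SOURCE A (Python) =====
-- def emailCharacters(email):
--     special = "~@!$%^&*_=+}{'?-."
--     Upper = ['A','B','C','D','E','F','G','H','I','J','K','L','M','N','O','P','Q','R','S','T','U','V','W','X','Y','Z'] ## 2 point
--     lower = ['a','b','c','d','e','f','g','h','i','j','k','l','m','n','o','p','q','r','s','t','u','v','w','x','y','z'] ## 4 potins
--     numbers = ['0','1','2','3','4','5','6','7','8','9'] ## 8 points
--
--     if 'xn--a' in email:
--         return 0
--
--
--     for x in email: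
--         if x in special:
--             continue
--         elif x in Upper:
--             continue
--         elif x in lower:
--             continue
--         elif x in numbers:
--             continue
--         else:
--             return(0)
--     return (1)
-- ===== SOURCE B (Python) =====
-- def emailCharacters(email):
--     if 'xn--a' in email:
--         return 0
--     allowed = "~@!$%^&*_=+}{'?-.ABCDEFGHIJKLMNOPQRSTUVWXYZabcdefghijklmnopqrstuvwxyz0123456789"
--     return 1 if sum(email.count(c) for c in allowed) == len(email) else 0
-- ===== Notes on version B (the rewrite author's own statement) =====
-- stated objective: alternative
-- what changed: Inverts the traversal: instead of A's per-character scan of the email through a four-alphabet branch ladder with early return, B iterates over the fixed allowed alphabet, counts each allowed character's occurrences in the email with str.count, and returns 1 iff the counts sum to len(email). (counting runs in C via str.count, removing the per-character Python loop)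
import Mathlib
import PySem

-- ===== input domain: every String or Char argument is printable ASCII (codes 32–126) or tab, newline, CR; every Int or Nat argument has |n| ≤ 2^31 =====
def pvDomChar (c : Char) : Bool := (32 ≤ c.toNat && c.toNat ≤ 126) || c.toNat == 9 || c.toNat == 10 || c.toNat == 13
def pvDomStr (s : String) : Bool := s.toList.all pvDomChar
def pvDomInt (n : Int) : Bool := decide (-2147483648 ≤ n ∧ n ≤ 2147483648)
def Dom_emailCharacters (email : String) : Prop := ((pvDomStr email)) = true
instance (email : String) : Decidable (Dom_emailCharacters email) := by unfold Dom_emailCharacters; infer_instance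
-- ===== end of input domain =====

-- B inverts the traversal: instead of scanning the email per character through A's branch
-- ladder, it loops over the fixed allowed alphabet, counts each character's occurrences in
-- the email, and returns 1 iff the counts sum to len(email) (objective: alternative).

-- ===== PORT A =====
def pvSpecialA : String := "~@!$%^&*_=+}{'?-."
def pvUpperA : List Char := ['A','B','C','D','E','F','G','H','I','J','K','L','M','N','O','P','Q','R','S','T','U','V','W','X','Y','Z']
def pvLowerA : List Char := ['a','b','c','d','e','f','g','h','i','j','k','l','m','n','o','p','q','r','s','t','u','v','w','x','y','z']
def pvNumbersA : List Char := ['0','1','2','3','4','5','6','7','8','9']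

-- the for-loop over email with its continue/early-return branches
def pvLoopA : List Char → Int
  | [] => 1
  | x :: rest =>
    if pvSpecialA.toList.contains x then pvLoopA rest
    else if pvUpperA.contains x then pvLoopA rest
    else if pvLowerA.contains x then pvLoopA rest
    else if pvNumbersA.contains x then pvLoopA rest
    else 0

def emailCharacters (email : String) : Int :=
  if PySem.Str.isIn "xn--a" email then 0
  else pvLoopA email.toList

-- ===== PORT B =====
def pvAllowedB : List Char :=
  "~@!$%^&*_=+}{'?-.ABCDEFGHIJKLMNOPQRSTUVWXYZabcdefghijklmnopqrstuvwxyz0123456789".toList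

def emailCharacters_alt (email : String) : Int :=
  if PySem.Str.isIn "xn--a" email then 0
  else if (pvAllowedB.map (fun c => (PySem.Str.count email (String.ofList [c]) : Int))).sum
            = PySem.Str.len email then 1 else 0

-- ===== PRECONDITION & SPEC =====
def Spec_emailCharacters (email : String) (out : Int) : Prop := out = emailCharacters_alt email
instance (email : String) (out : Int) : Decidable (Spec_emailCharacters email out) := by unfold Spec_emailCharacters; infer_instance

-- ===== CLAIM (what is proved, stated in full; the proofs are below) =====
def Claim_equal_emailCharacters : Prop := ∀ (email : String), Dom_emailCharacters email → Spec_emailCharacters email (emailCharacters email)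

-- ===== LEMMAS AND PROOFS =====

-- Python str.count with a single-character needle is the character count
lemma pvGoSingle (c : Char) : ∀ (fuel : Nat) (l : List Char) (acc : Nat), l.length ≤ fuel →
    PySem.Chars.count.go [c] fuel l acc = acc + l.count c := by
  intro fuel
  induction fuel with
  | zero => intro l acc h; cases l with
    | nil => simp [PySem.Chars.count.go]
    | cons a t => simp at h
  | succ n ih => intro l acc h; cases l with
    | nil => simp [PySem.Chars.count.go]
    | cons a t =>
      by_cases hc : c = a
      · subst hc
        simp [PySem.Chars.count.go, List.isPrefixOf, ih t (acc + 1) (by simpa using h)]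
        omega
      · simp [PySem.Chars.count.go, List.isPrefixOf, hc, ih t acc (by simpa using h)]
        simp [Ne.symm hc]

lemma pvCountSingle (cs : List Char) (c : Char) :
    PySem.Chars.count cs [c] = cs.count c := by
  simp [PySem.Chars.count, pvGoSingle c cs.length cs 0 le_rfl]

set_option maxRecDepth 4096 in
lemma pvAllowedB_nodup : pvAllowedB.Nodup := by decide

-- summing per-character counts over the (duplicate-free) alphabet counts the allowed positions
lemma pvSumCounts (cs : List Char) :
    (pvAllowedB.map (fun c => (cs.count c : Int))).sum
      = (cs.countP (fun x => decide (x ∈ pvAllowedB)) : Int) := by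
  induction cs with
  | nil => simp
  | cons x t ih =>
    have hmap : pvAllowedB.map (fun c => ((x :: t).count c : Int))
        = pvAllowedB.map (fun c => (t.count c : Int) + (if c == x then 1 else 0)) := by
      apply List.map_congr_left
      intro a _
      simp [List.count_cons]
      split <;> simp_all [eq_comm]
    rw [hmap, PySem.List.sum_map_add_int, ih, PySem.List.sum_map_ite_one_zero,
      List.countP_cons]
    have : pvAllowedB.countP (fun c => c == x) = pvAllowedB.count x := rfl
    rw [this]
    by_cases hx : x ∈ pvAllowedB
    · rw [List.count_eq_one_of_mem pvAllowedB_nodup hx]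
      simp [hx]
    · rw [List.count_eq_zero_of_not_mem hx]
      simp [hx]

-- A's loop returns 1 iff every character is in B's alphabet
lemma pvLoopA_eq_all (cs : List Char) :
    pvLoopA cs = if cs.all (fun c => c ∈ pvAllowedB) then 1 else 0 := by
  induction cs with
  | nil => rfl
  | cons x rest ih =>
    have hmem : (x ∈ pvAllowedB) ↔
        x ∈ pvSpecialA.toList ∨ x ∈ pvUpperA ∨ x ∈ pvLowerA ∨ x ∈ pvNumbersA := by
      have : pvAllowedB = pvSpecialA.toList ++ pvUpperA ++ pvLowerA ++ pvNumbersA := by decide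
      rw [this]; simp
    by_cases h1 : x ∈ pvSpecialA.toList <;>
      by_cases h2 : x ∈ pvUpperA <;>
        by_cases h3 : x ∈ pvLowerA <;>
          by_cases h4 : x ∈ pvNumbersA <;>
            simp [pvLoopA, List.all_cons, hmem, h1, h2, h3, h4, ih]

-- ===== VERDICT (by name: the statement is the Claim_ definition above) =====
theorem emailCharacters_spec : Claim_equal_emailCharacters := by
  intro email _
  unfold Spec_emailCharacters emailCharacters emailCharacters_alt
  rw [pvLoopA_eq_all]
  rw [PySem.Str.isIn_eq]
  by_cases hg : PySem.Chars.isIn "xn--a".toList email.toList = true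
  · rw [if_pos hg, if_pos hg]
  · rw [if_neg hg, if_neg hg]
    have hc : (fun c => (PySem.Str.count email (String.ofList [c]) : Int))
        = fun c => (email.toList.count c : Int) := by
      funext c
      rw [PySem.Str.count_eq]
      simp [pvCountSingle]
    rw [hc, pvSumCounts, PySem.Str.len_eq]
    generalize email.toList = cs at *
    by_cases hall : cs.all (fun c => c ∈ pvAllowedB)
    · have : cs.countP (fun x => decide (x ∈ pvAllowedB)) = cs.length := by
        rw [List.countP_eq_length]
        intro a ha
        simpa using (List.all_eq_true.mp hall a ha)
      simp [hall, this]
    · have hlt : cs.countP (fun x => decide (x ∈ pvAllowedB)) < cs.length := by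
        have hne : cs.countP (fun x => decide (x ∈ pvAllowedB)) ≠ cs.length := by
          intro h
          exact hall (List.all_eq_true.mpr (fun b hb => by
            simpa using (List.countP_eq_length.mp h b hb)))
        exact lt_of_le_of_ne List.countP_le_length hne
      rw [if_neg (by omega :
        ¬ ((cs.countP (fun x => decide (x ∈ pvAllowedB)) : Int) = (cs.length : Int)))]
      simp [hall]
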